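-- pv_equiv track=rewrite | github.com/elink21/tournamentWinter18 | supersaiyajin.py | increaseKi
-- ===== SOURCE A (Python) =====
-- def increaseKi(numbers):
-- 	original=[]
-- 	for i in range(len(numbers)):
-- 		original.append(numbers[i])
--
-- 	for i in range(len(numbers)):
-- 		suma=0
-- 		for x in range(len(numbers)):
-- 			if x!=i:suma+=original[x]
-- 		suma%=1000000007
-- 		numbers[i]=suma
-- 	return numbers
-- ===== SOURCE B (Python) =====
-- def increaseKi(numbers):
--     M = 1000000007
--     total = sum(numbers)
--     numbers[:] = [(total - x) % M for x in numbers]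
--     return numbers
-- ===== Notes on version B (the rewrite author's own statement) =====
-- stated objective: faster
-- what changed: Instead of recomputing the sum of all other elements for each index (nested loops), B computes the total sum once and subtracts each element, taking the result mod 1000000007.
import Mathlib
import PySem

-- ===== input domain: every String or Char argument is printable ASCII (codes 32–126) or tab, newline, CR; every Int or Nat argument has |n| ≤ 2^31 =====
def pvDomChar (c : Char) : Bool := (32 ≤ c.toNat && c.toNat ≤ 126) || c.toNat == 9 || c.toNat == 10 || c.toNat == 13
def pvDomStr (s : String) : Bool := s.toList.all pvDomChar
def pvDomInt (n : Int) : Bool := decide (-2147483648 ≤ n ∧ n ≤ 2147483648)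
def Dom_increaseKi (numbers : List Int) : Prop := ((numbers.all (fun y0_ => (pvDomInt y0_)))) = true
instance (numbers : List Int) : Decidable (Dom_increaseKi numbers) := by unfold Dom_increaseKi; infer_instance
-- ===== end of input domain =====

-- B replaces A's per-index rescan of all other elements by one total sum and a
-- subtraction per element (asymptotically faster). Python A mutates its argument in
-- place (B does the same via numbers[:]=...); the equivalence proved is about the return value.

-- ===== PORT A =====
def increaseKi (numbers : List Int) : List Int :=
  let original := numbers.foldl (fun acc x => acc ++ [x]) []
  (List.range numbers.length).foldl
    (fun nums i =>
      let suma := (List.range numbers.length).foldl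
        (fun s x => if x ≠ i then s + original.getD x 0 else s) 0
      let suma := PySem.Int.mod suma 1000000007
      nums.set i suma)
    numbers

-- ===== PORT B =====
def increaseKi_alt (numbers : List Int) : List Int :=
  let total := numbers.sum
  numbers.map (fun x => PySem.Int.mod (total - x) 1000000007)

-- ===== PRECONDITION & SPEC =====
def Spec_increaseKi (numbers : List Int) (out : List Int) : Prop := out = increaseKi_alt numbers
instance (numbers : List Int) (out : List Int) : Decidable (Spec_increaseKi numbers out) := by unfold Spec_increaseKi; infer_instance

-- ===== CLAIM (what is proved, stated in full; the proofs are below) =====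
def Claim_equal_increaseKi : Prop := ∀ (numbers : List Int), Dom_increaseKi numbers → Spec_increaseKi numbers (increaseKi numbers)

-- ===== LEMMAS AND PROOFS =====

-- the first loop of A copies the list
theorem pv_copy (l acc : List Int) :
    l.foldl (fun acc x => acc ++ [x]) acc = acc ++ l := by
  induction l generalizing acc with
  | nil => simp
  | cons a t ih => simp [List.foldl, ih]

-- the inner loop of A: sum of g over 0..n-1 skipping i
theorem pv_inner (g : Nat → Int) (i : Nat) (n : Nat) (c : Int) :
    (List.range n).foldl (fun s x => if x ≠ i then s + g x else s) c
      = c + ((List.range n).map g).sum - (if i < n then g i else 0) := by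
  induction n generalizing c with
  | zero => simp
  | succ n ih =>
    rw [List.range_succ, List.foldl_append, List.map_append, ih]
    by_cases h : n = i
    · subst h
      simp
      omega
    · have : i < n + 1 ↔ i < n := by omega
      simp [h, this]
      split <;> omega

-- mapping an index function over range (length) is mapping over the list
theorem pv_map_range (f : Int → Int) (l : List Int) :
    (List.range l.length).map (fun i => f (l.getD i 0)) = l.map f := by
  induction l with
  | nil => simp
  | cons a t ih =>
    rw [List.length_cons, List.range_succ_eq_map, List.map_cons, List.map_map]
    simp only [Function.comp_def, List.getD_cons_succ, List.getD_cons_zero, List.map_cons, ih]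

-- the outer loop of A writes v i at every index i
theorem pv_outer (v : Nat → Int) (k n : Nat) (l : List Int) (h : l.length = k + n) :
    (List.range' k n).foldl (fun nums i => nums.set i (v i)) l
      = l.take k ++ (List.range' k n).map v := by
  induction n generalizing k l with
  | zero => simp [List.take_of_length_le, h]
  | succ n ih =>
    rw [List.range'_succ, List.foldl_cons, ih _ _ (by simp [h]; omega)]
    have hk : k < l.length := by omega
    rw [List.map_cons]
    have : (l.set k (v k)).take (k + 1) = l.take k ++ [v k] := by
      rw [List.take_add_one, List.take_set, List.getElem?_set_self (by simpa using hk),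
          List.set_eq_of_length_le (by simp)]
      rfl
    rw [this]
    simp

-- list sum as a sum over indices
theorem pv_sum_getD (l : List Int) :
    ((List.range l.length).map (fun i => l.getD i 0)).sum = l.sum := by
  have := pv_map_range id l
  simpa using congrArg List.sum this

-- ===== VERDICT (by name: the statement is the Claim_ definition above) =====
theorem increaseKi_spec : Claim_equal_increaseKi := by
  intro numbers _
  show increaseKi numbers = increaseKi_alt numbers
  unfold increaseKi increaseKi_alt
  rw [pv_copy]
  simp only [List.nil_append]
  have hrange : List.range numbers.length = List.range' 0 numbers.length := by
    rw [List.range_eq_range']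
  rw [hrange, pv_outer _ 0 _ _ (by omega)]
  simp only [List.take_zero, List.nil_append, ← hrange]
  have : ∀ i, (List.range numbers.length).foldl
      (fun s x => if x ≠ i then s + numbers.getD x 0 else s) 0
      = numbers.sum - (if i < numbers.length then numbers.getD i 0 else 0) := by
    intro i
    rw [pv_inner, pv_sum_getD]; omega
  calc (List.range numbers.length).map (fun i =>
        PySem.Int.mod ((List.range numbers.length).foldl
          (fun s x => if x ≠ i then s + numbers.getD x 0 else s) 0) 1000000007)
      = (List.range numbers.length).map (fun i =>
          PySem.Int.mod (numbers.sum - numbers.getD i 0) 1000000007) := by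
        apply List.map_congr_left
        intro i hi
        rw [this i]
        simp [List.mem_range.mp hi]
    _ = numbers.map (fun x => PySem.Int.mod (numbers.sum - x) 1000000007) :=
        pv_map_range (fun x => PySem.Int.mod (numbers.sum - x) 1000000007) numbers
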